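-- pv_equiv track=rewrite | github.com/gronerl/st_connect4 | tests/test_game.py | str_to_board
-- ===== SOURCE A (Python) =====
-- def str_to_board(board_str):
--     board_str = board_str.strip()
--     rows = board_str.split("\n")
--     n_cols = len(rows[0]) - 2
--     res = [list() for _ in range(n_cols)]
--     for row in reversed(rows[1:-1]):
--         for col, char in enumerate(row[1:-1]):
--             res[col].append(char)
--     return res
-- ===== SOURCE B (Python) =====
-- def str_to_board(board_str):
--     lines = board_str.strip().split("\n")
--     width = len(lines[0]) - 2
--     flat = "".join(line[1:-1] for line in lines[-2:0:-1])
--     return [list(flat[c::width]) for c in range(width)]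
-- ===== Notes on version B (the rewrite author's own statement) =====
-- stated objective: alternative
-- what changed: B flattens the reversed inner rows into one string and extracts each column as an arithmetic-stride slice flat[c::width], replacing A's nested row-by-row loop that mutates per-column accumulator lists. Pre_ excludes strings whose stripped inner lines differ in length from the first line: there A either raises IndexError or returns ragged column lists that are an accident of its per-column append loop, while B's flat stride slicing misaligns or truncates.
-- outside the precondition, e.g. on str_to_board('abcd\nwxyz\nwxy\nabcd'): A returns [['x', 'x'], ['y']], B returns [['x', 'y'], ['x']]; on str_to_board('ab\nwxyz\nab'): A raises IndexError, B returns []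
import Mathlib
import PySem

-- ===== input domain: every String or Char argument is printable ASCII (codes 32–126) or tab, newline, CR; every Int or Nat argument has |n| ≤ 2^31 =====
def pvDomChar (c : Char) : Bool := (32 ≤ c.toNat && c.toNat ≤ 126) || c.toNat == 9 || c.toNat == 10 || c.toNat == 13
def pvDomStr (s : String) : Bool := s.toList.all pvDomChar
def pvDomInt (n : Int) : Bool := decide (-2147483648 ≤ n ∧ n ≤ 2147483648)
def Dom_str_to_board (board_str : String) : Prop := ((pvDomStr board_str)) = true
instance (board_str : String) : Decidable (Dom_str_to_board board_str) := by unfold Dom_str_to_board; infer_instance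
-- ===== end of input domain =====

-- B flattens the reversed inner rows into one string and reads each column off it as
-- an arithmetic-stride slice flat[c::width], instead of A's nested row loop mutating
-- per-column accumulators; same cost, a different algorithm.

-- ===== PORT A =====
-- inner loop: for col, char in enumerate(row[1:-1]): res[col].append(char)
-- (col starts at 0 and counts up, so plain Nat set/getD; out-of-range col is an
-- IndexError in Python, excluded by Pre_)
def loopCharsA : List (List String) → Nat → List Char → List (List String)
  | res, _, [] => res
  | res, col, c :: cs =>
      loopCharsA (res.set col (res.getD col [] ++ [String.ofList [c]])) (col + 1) cs

-- outer loop: for row in reversed(rows[1:-1]): …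
def loopRowsA : List (List String) → List (List Char) → List (List String)
  | res, [] => res
  | res, r :: rs => loopRowsA (loopCharsA res 0 (PySem.List.slice r (some 1) (some (-1)))) rs

def str_to_board (board_str : String) : List (List String) :=
  let s := PySem.Chars.strip board_str.toList
  let rows := PySem.Chars.splitOn s ['\n']
  let n_cols : Int := (PySem.Chars.len (PySem.List.pyGetD rows 0 [])) - 2
  let res := (PySem.List.pyRange 0 n_cols 1).map (fun _ => ([] : List String))
  loopRowsA res (PySem.List.slice rows (some 1) (some (-1))).reverse

-- ===== PORT B =====
def str_to_board_alt (board_str : String) : List (List String) :=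
  let lines := PySem.Chars.splitOn (PySem.Chars.strip board_str.toList) ['\n']
  let width : Int := (PySem.Chars.len (PySem.List.pyGetD lines 0 [])) - 2
  -- flat = "".join(line[1:-1] for line in lines[-2:0:-1]); an extended slice cannot
  -- raise (its step is a nonzero literal), so .getD [] only strips the Option
  let flat := ((PySem.List.slice? lines (some (-2)) (some 0) (-1)).getD []).flatMap
      (fun l => PySem.List.slice l (some 1) (some (-1)))
  -- [list(flat[c::width]) for c in range(width)]; width > 0 whenever range(width) ≠ []
  (PySem.List.pyRange 0 width 1).map
    (fun c => ((PySem.List.slice? flat (some c) none width).getD []).map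
      (fun ch => String.ofList [ch]))

-- ===== PRECONDITION & SPEC =====
-- Pre_ excludes strings whose stripped inner lines (all but the first and last) differ
-- in length from the first line: there A either raises IndexError or returns ragged
-- column lists that are an accident of its per-column append loop, and B's flat
-- stride slicing misaligns or truncates.
def Pre_str_to_board (board_str : String) : Prop :=
  ∀ r ∈ PySem.List.slice (PySem.Chars.splitOn (PySem.Chars.strip board_str.toList) ['\n']) (some 1) (some (-1)),
    r.length = ((PySem.Chars.splitOn (PySem.Chars.strip board_str.toList) ['\n']).headD []).length

instance (board_str : String) : Decidable (Pre_str_to_board board_str) := by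
  unfold Pre_str_to_board; infer_instance

def pvWitness_str_to_board : String := "+--+\n|ab|\n|cd|\n+--+"

def Spec_str_to_board (board_str : String) (out : List (List String)) : Prop := out = str_to_board_alt board_str
instance (board_str : String) (out : List (List String)) : Decidable (Spec_str_to_board board_str out) := by unfold Spec_str_to_board; infer_instance

-- ===== CLAIM (what is proved, stated in full; the proofs are below) =====
def Claim_equal_str_to_board : Prop := ∀ (board_str : String), Dom_str_to_board board_str → Pre_str_to_board board_str → Spec_str_to_board board_str (str_to_board board_str)

-- ===== LEMMAS AND PROOFS =====

lemma loopCharsA_eq (r : List Char) : ∀ (pre res : List (List String)),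
    r.length = res.length →
    loopCharsA (pre ++ res) pre.length r
      = pre ++ List.zipWith (fun l c => l ++ [String.ofList [c]]) res r := by
  induction r with
  | nil =>
      intro pre res h
      have : res = [] := List.eq_nil_of_length_eq_zero h.symm
      simp [this, loopCharsA]
  | cons c cs ih =>
      intro pre res h
      cases res with
      | nil => simp at h
      | cons l res' =>
        have hget : (pre ++ l :: res').getD pre.length [] = l := by
          simp
        have hset : (pre ++ l :: res').set pre.length (l ++ [String.ofList [c]])
            = (pre ++ [l ++ [String.ofList [c]]]) ++ res' := by
          rw [List.set_append_right _ _ (by omega)]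
          simp
        have hlen : pre.length + 1 = (pre ++ [l ++ [String.ofList [c]]]).length := by simp
        simp only [loopCharsA, hget, hset, hlen]
        rw [ih _ res' (by simpa using h)]
        simp

lemma loopRowsA_eq (rows : List (List Char)) : ∀ (res : List (List String)),
    (∀ r ∈ rows, (PySem.List.slice r (some 1) (some (-1))).length = res.length) →
    loopRowsA res rows
      = (List.range res.length).map
          (fun c => res.getD c [] ++ rows.map
            (fun row => String.ofList [(PySem.List.slice row (some 1) (some (-1))).getD c ' '])) := by
  induction rows with
  | nil =>
      intro res _
      simp only [loopRowsA, List.map_nil, List.append_nil]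
      apply List.ext_getElem (by simp)
      intro i h1 h2
      simp only [List.getElem_map, List.getElem_range]
      rw [List.getD_eq_getElem _ _ h1]
  | cons r rs ih =>
      intro res h
      have hr : (PySem.List.slice r (some 1) (some (-1))).length = res.length :=
        h r (by simp)
      have h0 : loopCharsA res 0 (PySem.List.slice r (some 1) (some (-1)))
          = List.zipWith (fun l c => l ++ [String.ofList [c]]) res
              (PySem.List.slice r (some 1) (some (-1))) := by
        have := loopCharsA_eq (PySem.List.slice r (some 1) (some (-1))) [] res hr
        simpa using this
      have hlen : (List.zipWith (fun l c => l ++ [String.ofList [c]]) res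
          (PySem.List.slice r (some 1) (some (-1)))).length = res.length := by
        simp [hr]
      simp only [loopRowsA, h0]
      rw [ih _ (by intro x hx; rw [hlen]; exact h x (by simp [hx]))]
      rw [hlen]
      apply List.map_congr_left
      intro c hc
      have hc' : c < res.length := by simpa using hc
      rw [List.getD_eq_getElem _ _ (by simpa [hr] using hc'),
          List.getD_eq_getElem _ _ hc']
      simp only [List.getElem_zipWith, List.map_cons]
      rw [List.getD_eq_getElem _ _ (by omega)]
      simp

lemma getD_map_const {α : Type} (l : List α) (c : Nat) :
    (l.map (fun _ => ([] : List String))).getD c [] = [] := by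
  rcases lt_or_ge c l.length with h | h
  · rw [List.getD_eq_getElem _ _ (by simpa using h)]
    simp
  · rw [List.getD_eq_default _ _ (by simpa using h)]

lemma filterMap_range_eq_map {α : Type} (f : Nat → Option α) (g : Nat → α) (m : Nat)
    (h : ∀ k < m, f k = some (g k)) :
    List.filterMap f (List.range m) = (List.range m).map g := by
  induction m with
  | zero => simp
  | succ m ih =>
      rw [List.range_succ, List.filterMap_append, List.map_append,
        ih (fun k hk => h k (by omega))]
      simp [h m (by omega)]

lemma map_range_getD {α : Type} [Inhabited α] (l : List α) :
    (List.range l.length).map (fun k => l.getD k default) = l := by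
  apply List.ext_getElem (by simp)
  intro i h1 h2
  simp only [List.getElem_map, List.getElem_range]
  rw [List.getD_eq_getElem _ _ h2]

lemma slice?_rev_inner {α : Type} [Inhabited α] (xs : List α) :
    PySem.List.slice? xs (some (-2)) (some 0) (-1) = some xs.tail.dropLast.reverse := by
  simp only [PySem.List.slice?, PySem.List.sliceIndices]
  norm_num
  rcases Nat.lt_or_ge xs.length 3 with hn | hn
  · rw [if_neg (by omega)]
    have : xs.tail.dropLast = [] := by
      apply List.eq_nil_of_length_eq_zero
      simp; omega
    simp [this]
  · rw [if_pos (by left; omega)]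
    have hcnt : (max (-2 + (xs.length : Int)) (-1) - min 0 ((xs.length : Int) - 1)).toNat
        = xs.length - 2 := by omega
    rw [hcnt]
    have hlen : xs.tail.dropLast.reverse.length = xs.length - 2 := by simp; omega
    rw [filterMap_range_eq_map _ (fun k => xs.tail.dropLast.reverse.getD k default) _
      (by
        intro k hk
        have hidx : ((max (-2 + (xs.length : Int)) (-1)) + -(k : Int)).toNat
            = xs.length - 2 - k := by omega
        rw [hidx]
        have hlt : xs.length - 2 - k < xs.length := by omega
        rw [List.getElem?_eq_getElem hlt]
        congr 1
        show _ = xs.tail.dropLast.reverse.getD k default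
        rw [List.getD_eq_getElem _ _ (by omega : k < xs.tail.dropLast.reverse.length)]
        rw [List.getElem_reverse, List.getElem_dropLast, List.getElem_tail]
        congr 1
        simp at hlen ⊢
        omega)]
    rw [← hlen, map_range_getD]

lemma flatten_getElem? {α : Type} (d : α) (w c : Nat) (hc : c < w) :
    ∀ (chunks : List (List α)) (k : Nat), (∀ ch ∈ chunks, ch.length = w) →
      k < chunks.length →
      chunks.flatten[(c + w * k)]? = some ((chunks.getD k []).getD c d) := by
  intro chunks
  induction chunks with
  | nil => intro k _ hk; simp at hk
  | cons ch rest ih =>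
      intro k hall hk
      have hch : ch.length = w := hall ch (by simp)
      cases k with
      | zero =>
          simp only [List.flatten_cons, Nat.mul_zero, Nat.add_zero]
          rw [List.getElem?_append_left (by omega)]
          rw [List.getElem?_eq_getElem (by omega)]
          simp only [List.getD_cons_zero]
          rw [List.getD_eq_getElem _ _ (by omega)]
      | succ k =>
          simp only [List.flatten_cons]
          rw [List.getElem?_append_right (by rw [hch, Nat.mul_succ]; omega)]
          have : c + w * (k + 1) - ch.length = c + w * k := by
            rw [hch, Nat.mul_succ]; omega
          rw [this]
          rw [ih k (fun x hx => hall x (by simp [hx])) (by simpa using hk)]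
          simp

lemma slice?_stride {α : Type} (d : α) (w : Nat) (hw : 0 < w) (c : Nat) (hc : c < w)
    (chunks : List (List α)) (hall : ∀ ch ∈ chunks, ch.length = w) :
    PySem.List.slice? chunks.flatten (some (c : Int)) none (w : Int)
      = some (chunks.map (fun ch => ch.getD c d)) := by
  have hflen : chunks.flatten.length = w * chunks.length := by
    rw [List.length_flatten]
    induction chunks with
    | nil => simp
    | cons ch rest ih =>
        simp only [List.map_cons, List.sum_cons, hall ch (by simp)]
        rw [ih (fun x hx => hall x (by simp [hx]))]
        rw [List.length_cons, Nat.mul_succ]; omega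
  simp only [PySem.List.slice?, PySem.List.sliceIndices]
  rw [if_neg (by omega)]
  have h1 : ¬((c : Int) < 0) := by omega
  have h2 : ¬((w : Int) < 0) := by omega
  have h3 : (0 : Int) < (w : Int) := by omega
  simp only [h1, h2, h3, if_false]
  rcases chunks.eq_nil_or_concat.symm with hne | rfl
  case inr => simp [List.flatten_nil]
  have hm : 0 < chunks.length := by
    rcases hne with ⟨l, a, rfl⟩; simp
  have hlen0 : (w : Int) * chunks.length ≤ chunks.flatten.length := by
    rw [hflen]; push_cast; omega
  have hmin : min (c : Int) (chunks.flatten.length : Int) = (c : Int) := by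
    have : (c : Int) < (w : Int) * chunks.length := by nlinarith
    omega
  have hclen : (c : Int) < (chunks.flatten.length : Int) := by
    rw [hflen]; push_cast; nlinarith
  rw [hmin, if_pos hclen]
  have hcnt : (((chunks.flatten.length : Int) - (c : Int) + w - 1) / w).toNat
      = chunks.length := by
    rw [hflen]
    push_cast
    have hq : (w : Int) * chunks.length - c + w - 1
        = ((w : Int) - 1 - c) + (w : Int) * chunks.length := by ring
    rw [hq, Int.add_mul_ediv_left _ _ (by omega : (w : Int) ≠ 0),
      Int.ediv_eq_zero_of_lt (by omega) (by omega)]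
    omega
  rw [hcnt]
  rw [filterMap_range_eq_map _ (fun k => (chunks.getD k []).getD c d) _
    (by
      intro k hk
      have hidx : (((c : Nat) : Int) + (w : Int) * (k : Int)).toNat = c + w * k := by
        omega
      rw [hidx]
      exact flatten_getElem? d w c hc chunks k hall hk)]
  congr 1
  apply List.ext_getElem (by simp)
  intro i hi1 hi2
  simp only [List.getElem_map, List.getElem_range]
  have hi : i < chunks.length := by simpa using hi2
  rw [List.getD_eq_getElem _ _ hi,
    List.getD_eq_getElem _ _ (show c < chunks[i].length by
      rw [hall _ (List.getElem_mem _)]; exact hc)]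

lemma slice_one_neg_one {α : Type} (xs : List α) :
    PySem.List.slice xs (some 1) (some (-1)) = xs.tail.dropLast := by
  cases xs with
  | nil => simp [PySem.List.slice, PySem.List.clampIdx]
  | cons a l =>
      simp only [PySem.List.slice, PySem.List.clampIdx]
      norm_num
      rw [List.dropLast_eq_take]
      congr 1

-- ===== VERDICT (by name: the statement is the Claim_ definition above) =====
theorem str_to_board_spec : Claim_equal_str_to_board := by
  intro board_str _ hpre
  unfold Pre_str_to_board at hpre
  unfold Spec_str_to_board str_to_board str_to_board_alt
  simp only []
  set s := PySem.Chars.strip board_str.toList with hs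
  set rows := PySem.Chars.splitOn s ['\n'] with hrows
  set L : Nat := (rows.headD []).length with hL
  have hpre' : ∀ r ∈ PySem.List.slice rows (some 1) (some (-1)), r.length = L := hpre
  have hgen : ∀ (xs : List (List Char)),
      PySem.Chars.len (PySem.List.pyGetD xs 0 []) = ((xs.headD []).length : Int) := by
    intro xs
    rw [PySem.List.pyGetD_zero]
    cases xs <;> simp [PySem.Chars.len_eq]
  have hL0 : PySem.Chars.len (PySem.List.pyGetD rows 0 []) = (L : Int) := by
    rw [hgen rows, hL]
  set n : Int := (L : Int) - 2 with hn
  rw [hL0]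
  -- every sliced inner row has exactly n.toNat characters (Pre_: rectangular grid)
  have hslice : ∀ r ∈ PySem.List.slice rows (some 1) (some (-1)),
      (PySem.List.slice r (some 1) (some (-1))).length = n.toNat := by
    intro r hr
    rw [PySem.List.length_slice, PySem.List.clampIdx_neg_one]
    have h1 : PySem.List.clampIdx r.length (1 : Int) = min 1 r.length := by
      exact_mod_cast PySem.List.clampIdx_natCast r.length 1
    rw [h1, hpre' r hr, hn]
    omega
  have hres : ((PySem.List.pyRange 0 n 1).map (fun _ => ([] : List String))).length = n.toNat := by
    simp [PySem.List.length_pyRange_one]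
  have hinner : ∀ r ∈ (PySem.List.slice rows (some 1) (some (-1))).reverse,
      r ∈ PySem.List.slice rows (some 1) (some (-1)) := by
    intro r hr
    exact List.mem_reverse.mp hr
  rw [loopRowsA_eq _ _ (by intro r hr; rw [hres]; exact hslice r (hinner r hr))]
  rw [hres]
  -- B side: lines[-2:0:-1] is the reversed inner rows, so flat is the flattening of
  -- the reversed sliced inner rows
  rw [slice?_rev_inner rows]
  have hflat : (rows.tail.dropLast.reverse.flatMap
        (fun l => PySem.List.slice l (some 1) (some (-1))))
      = ((PySem.List.slice rows (some 1) (some (-1))).reverse.map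
          (fun l => PySem.List.slice l (some 1) (some (-1)))).flatten := by
    rw [slice_one_neg_one rows, List.flatMap_def]
  simp only [Option.getD_some]
  rw [hflat]
  rw [PySem.List.pyRange_one 0 n]
  simp only [sub_zero, List.map_map]
  apply List.map_congr_left
  intro c hc
  have hc' : c < n.toNat := by simpa using hc
  have hn0 : (0 : Int) < n := by omega
  have hncast : n = ((n.toNat : Nat) : Int) := by omega
  simp only [Function.comp_def, zero_add]
  rw [getD_map_const, List.nil_append]
  -- stride slice of the flattening = entry c of every reversed inner row
  rw [show ((L : Int) - 2) = ((n.toNat : Nat) : Int) from by omega]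
  rw [slice?_stride ' ' n.toNat (by omega) c hc'
      ((PySem.List.slice rows (some 1) (some (-1))).reverse.map
        (fun l => PySem.List.slice l (some 1) (some (-1))))
      (by intro ch hch
          rcases List.mem_map.mp hch with ⟨r, hr, rfl⟩
          exact hslice r (hinner r hr))]
  simp only [Option.getD_some, List.map_map]
  apply List.map_congr_left
  intro row hrow
  simp [Function.comp_def]
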